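-- pv_equiv track=rewrite | github.com/johnyejin/Algorithm_python | Week3_Programmers/(힙)더맵게_런타임에러+시간초과.py | solution
-- ===== SOURCE A (Python) =====
-- def solution(scoville, K):
--     answer = 0
--
--     # 매번 정렬 안하려면 min값 2번 찾아서 지워주기
--
--     while min(scoville) < K:
--         scoville.sort()
--
--         new_scoville = scoville[0] + scoville[1] * 2
--         del scoville[0:2]
--         scoville.append(new_scoville)
--
--         answer += 1
--
--     if max(scoville) < K:
--         return -1
--
--     return answer
-- ===== SOURCE B (Python) =====
-- def solution(scoville, K):
--     # Sort once, then keep the working list sorted by binary-search insertion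
--     # instead of re-sorting on every step; returns -1 when mixing cannot succeed.
--     s = sorted(scoville)
--     answer = 0
--     while s[0] < K:
--         if len(s) == 1:
--             return -1
--         new = s[0] + 2 * s[1]
--         s = s[2:]
--         lo, hi = 0, len(s)
--         while lo < hi:
--             mid = (lo + hi) // 2
--             if s[mid] < new:
--                 lo = mid + 1
--             else:
--                 hi = mid
--         s.insert(lo, new)
--         answer += 1
--     return answer
-- ===== Notes on version B (the rewrite author's own statement) =====
-- stated objective: faster
-- what changed: B sorts the list once and then maintains sortedness by binary-search insertion of each mixed value, instead of A's re-sorting of the whole list on every loop iteration; B also returns -1 where A's dead 'return -1' branch is unreachable and A instead crashes.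
import Mathlib
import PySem

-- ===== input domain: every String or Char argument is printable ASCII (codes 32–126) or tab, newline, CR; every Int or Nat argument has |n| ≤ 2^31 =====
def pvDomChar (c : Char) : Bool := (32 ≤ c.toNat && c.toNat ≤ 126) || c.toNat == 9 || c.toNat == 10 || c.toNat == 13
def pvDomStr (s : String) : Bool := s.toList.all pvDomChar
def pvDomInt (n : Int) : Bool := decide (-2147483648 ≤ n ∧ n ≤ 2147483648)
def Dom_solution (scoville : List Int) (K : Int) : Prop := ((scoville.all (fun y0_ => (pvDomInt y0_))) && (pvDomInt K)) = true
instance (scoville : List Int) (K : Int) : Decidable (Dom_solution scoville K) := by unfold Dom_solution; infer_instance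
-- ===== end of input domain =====

-- B sorts once and maintains order by binary-search insertion instead of A's re-sort per step.
-- Return values only: A sorts its list argument in place, B does not mutate it.

-- ===== PORT A =====
def solutionGo (scoville : List Int) (K : Int) (answer : Int) : Int :=
  match PySem.List.min? scoville (fun x => x) with
  | none => 0      -- min([]) raises ValueError (empty input; outside Pre_)
  | some m =>
    if m < K then
      match h : PySem.List.sorted scoville (fun x => x) false with
      | s0 :: s1 :: rest =>
          -- new = scoville[0] + scoville[1] * 2; del scoville[0:2]; scoville.append(new)
          solutionGo (rest ++ [s0 + s1 * 2]) K (answer + 1)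
      | _ => 0     -- scoville[1] raises IndexError (outside Pre_)
    else
      match PySem.List.max? scoville (fun x => x) with
      | none => 0
      | some M => if M < K then -1 else answer
termination_by scoville.length
decreasing_by
  have hl := congrArg List.length h
  simp [PySem.List.length_sorted] at hl
  simp
  omega

def solution (scoville : List Int) (K : Int) : Int := solutionGo scoville K 0

-- ===== PORT B =====
-- the inner 'while lo < hi' binary-search loop of Source B
def bsLoop (s : List Int) (x : Int) (lo hi : Int) : Int :=
  if h : lo < hi then
    let mid := PySem.Int.floordiv (lo + hi) 2
    if PySem.List.pyGetD s mid 0 < x then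
      bsLoop s x (mid + 1) hi
    else
      bsLoop s x lo mid
  else lo
termination_by (hi - lo).toNat
decreasing_by
  · have h1 := PySem.Int.floordiv_two_mid_bounds (lo := lo) (hi := hi) (le_of_lt h)
    omega
  · have h2 : PySem.Int.floordiv (lo + hi) 2 < hi := by
      rw [PySem.Int.floordiv_lt_iff_lt_mul (by omega)]
      omega
    omega

-- the outer 'while s[0] < K' loop of Source B
def altGo (s : List Int) (K : Int) (answer : Int) : Int :=
  match s with
  | [] => 0          -- s[0] raises IndexError (empty input; outside Pre_)
  | a :: rest =>
    if a < K then
      match rest with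
      | [] => -1     -- len(s) == 1
      | b :: rest' =>
          -- new = s[0] + 2 * s[1]; s = s[2:]; insert new at the binary-search position
          altGo (PySem.List.insert rest'
                   (bsLoop rest' (a + 2 * b) 0 (PySem.List.len rest'))
                   (a + 2 * b)) K (answer + 1)
    else answer
termination_by s.length
decreasing_by simp [PySem.List.length_insert]

def solution_alt (scoville : List Int) (K : Int) : Int :=
  altGo (PySem.List.sorted scoville (fun x => x) false) K 0

-- ===== PRECONDITION & SPEC =====
-- `mixOkN n s K`: does the greedy mixing process on the ASCENDING-sorted list `s` reach a state
-- with every value ≥ K?  `n` is a structural bound (the list shrinks by one per step, so any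
-- n ≥ s.length gives the same answer and the 0-fuel case is never hit).  This is neither port's
-- algorithm: it keeps a sorted list sorted by Mathlib's ordered insertion.
def mixOkN : Nat → List Int → Int → Bool
  | _, [], _ => false
  | _, [a], K => decide (K ≤ a)
  | 0, _ :: _ :: _, _ => false
  | n+1, a :: b :: rest, K =>
      if K ≤ a then true
      else mixOkN n (List.orderedInsert (· ≤ ·) (a + 2 * b) rest) K

def mixOk (s : List Int) (K : Int) : Bool := mixOkN s.length s K

-- A raises (ValueError on [], otherwise eventually IndexError at scoville[1]) exactly on the inputs
-- where mixing cannot bring every value up to K — its 'return -1' line is dead code.  That success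
-- set has no closed form, so Pre_ states it with the independent recursion mixOk above.
def Pre_solution (scoville : List Int) (K : Int) : Prop :=
  mixOk (PySem.List.sorted scoville (fun x => x) false) K = true
instance (scoville : List Int) (K : Int) : Decidable (Pre_solution scoville K) := by
  unfold Pre_solution; infer_instance

def pvWitness_solution : List Int × Int := ([1, 2, 9], 3)

def Spec_solution (scoville : List Int) (K : Int) (out : Int) : Prop := out = solution_alt scoville K
instance (scoville : List Int) (K : Int) (out : Int) : Decidable (Spec_solution scoville K out) := by
  unfold Spec_solution; infer_instance

-- ===== CLAIM (what is proved, stated in full; the proofs are below) =====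
def Claim_equal_solution : Prop := ∀ (scoville : List Int) (K : Int), Dom_solution scoville K → Pre_solution scoville K → Spec_solution scoville K (solution scoville K)

-- ===== LEMMAS AND PROOFS =====

-- index i of a ≤-sorted list holds a value < x iff i is below the length of the (< x)-prefix
lemma sorted_lt_iff_lt_takeWhile (s : List Int) (x : Int) (hs : s.Pairwise (· ≤ ·))
    (i : Nat) (hi : i < s.length) :
    s[i] < x ↔ i < (s.takeWhile (fun y => decide (y < x))).length := by
  set p : Int → Bool := fun y => decide (y < x) with hp
  set k := (s.takeWhile p).length with hk
  have hkle : k ≤ s.length := (List.takeWhile_prefix p).length_le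
  constructor
  · intro hlt
    by_contra hik
    have hki : k ≤ i := Nat.le_of_not_lt hik
    have hklen : k < s.length := Nat.lt_of_le_of_lt hki hi
    have hdrop : List.dropWhile p s ≠ [] := by
      intro hnil
      have := List.takeWhile_append_dropWhile (p := p) (l := s)
      rw [hnil, List.append_nil] at this
      have := congrArg List.length this
      omega
    have e : List.takeWhile p s ++ List.dropWhile p s = s :=
      List.takeWhile_append_dropWhile (p := p) (l := s)
    have hgk : s[k] = (List.dropWhile p s).head hdrop := by
      have h1 : s[k] = (List.takeWhile p s ++ List.dropWhile p s)[k]'(by rw [e]; exact hklen) :=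
        List.getElem_of_eq e.symm hklen
      rw [h1, List.getElem_append_right (by omega)]
      simp [← hk]
      exact (List.getElem_zero_eq_head (l := List.dropWhile p s) (List.length_pos_iff.mpr hdrop))
    have hfail : p s[k] = false := by rw [hgk]; exact List.head_dropWhile_not p hdrop
    have hle : s[k] ≤ s[i] := by
      rcases Nat.eq_or_lt_of_le hki with h | h
      · simp [h]
      · exact List.pairwise_iff_getElem.mp hs k i hklen hi h
    have : p s[k] = true := by simp [hp]; omega
    simp [this] at hfail
  · intro hik
    have hpref := List.takeWhile_prefix (l := s) p
    have : (s.takeWhile p)[i] = s[i] := hpref.getElem (by omega)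
    have hmem : (s.takeWhile p)[i] ∈ s.takeWhile p := List.getElem_mem _
    have := List.mem_takeWhile_imp hmem
    rw [‹(s.takeWhile p)[i] = s[i]›] at this
    simpa [hp] using this

-- the binary-search loop of Source B lands on the length of the (< x)-prefix
lemma bsLoop_eq (s : List Int) (x : Int) (hs : s.Pairwise (· ≤ ·)) :
    ∀ (n : Nat) (lo hi : Int), (hi - lo).toNat ≤ n → 0 ≤ lo → hi ≤ (s.length : Int) →
      lo ≤ ((s.takeWhile (fun y => decide (y < x))).length : Int) →
      ((s.takeWhile (fun y => decide (y < x))).length : Int) ≤ hi →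
      bsLoop s x lo hi = (s.takeWhile (fun y => decide (y < x))).length := by
  intro n
  induction n with
  | zero =>
    intro lo hi hfuel h0 hlen hc1 hc2
    rw [bsLoop]
    have : ¬ lo < hi := by omega
    simp [this]
    omega
  | succ n ih =>
    intro lo hi hfuel h0 hlen hc1 hc2
    rw [bsLoop]
    by_cases hlh : lo < hi
    · simp only [hlh, dif_pos]
      have hm := PySem.Int.floordiv_two_mid_bounds (lo := lo) (hi := hi) (le_of_lt hlh)
      have hmlt : PySem.Int.floordiv (lo + hi) 2 < hi := by
        rw [PySem.Int.floordiv_lt_iff_lt_mul (by omega)]; omega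
      set mid := PySem.Int.floordiv (lo + hi) 2 with hmid
      have hmid0 : 0 ≤ mid := le_trans h0 hm.1
      have hmidlen : mid < (s.length : Int) := lt_of_lt_of_le hmlt hlen
      have hget : PySem.List.pyGetD s mid 0 = s[mid.toNat]'(by omega) :=
        PySem.List.pyGetD_eq_getElem s 0 hmid0 hmidlen
      have hiff := sorted_lt_iff_lt_takeWhile s x hs mid.toNat (by omega)
      by_cases hcmp : PySem.List.pyGetD s mid 0 < x
      · simp only [hcmp, if_pos]
        have : mid.toNat < (s.takeWhile (fun y => decide (y < x))).length := by
          rw [← hiff, ← hget]; exact hcmp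
        exact ih (mid + 1) hi (by omega) (by omega) hlen (by omega) hc2
      · simp only [hcmp, if_neg, not_false_iff]
        have : ¬ mid.toNat < (s.takeWhile (fun y => decide (y < x))).length := by
          rw [← hiff, ← hget]; exact hcmp
        exact ih lo mid (by omega) h0 (by omega) hc1 (by omega)
    · simp [hlh]
      omega

-- inserting at that position is exactly ordered insertion
lemma insert_takeWhile_eq_orderedInsert (s : List Int) (x : Int) :
    PySem.List.insert s (((s.takeWhile (fun y => decide (y < x))).length : Nat) : Int) x
      = List.orderedInsert (· ≤ ·) x s := by
  set p : Int → Bool := fun y => decide (y < x) with hp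
  have hkle : (s.takeWhile p).length ≤ s.length := (List.takeWhile_prefix p).length_le
  have e : List.takeWhile p s ++ List.dropWhile p s = s :=
    List.takeWhile_append_dropWhile (p := p) (l := s)
  rw [PySem.List.insert_natCast s _ x hkle]
  rw [List.orderedInsert_eq_take_drop]
  have hpe : (fun b => decide ¬ x ≤ b) = p := by
    funext b; simp [hp]
  rw [hpe]
  set k := (List.takeWhile p s).length with hk
  congr 1
  · conv_lhs => rw [← e]
    rw [hk]
    exact List.take_left
  · congr 1
    conv_lhs => rw [← e]
    rw [hk]
    exact List.drop_left

-- min(s) is the head of sorted(s)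
lemma min?_eq_sorted_head (s : List Int) (a : Int) (t : List Int)
    (h : PySem.List.sorted s (fun x => x) false = a :: t) :
    PySem.List.min? s (fun x => x) = some a := by
  have hne : s ≠ [] := by
    intro hnil
    rw [hnil] at h
    have h2 : ([] : List Int) = a :: t := by rw [← h]; rfl
    simp at h2
  obtain ⟨m, hm⟩ : ∃ m, PySem.List.min? s (fun x => x) = some m := by
    cases hmin : PySem.List.min? s (fun x => x) with
    | none => exact absurd ((PySem.List.min?_eq_none_iff s _).mp hmin) hne
    | some m => exact ⟨m, rfl⟩
  have hmem : m ∈ s := PySem.List.min?_mem hm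
  have hma : m ≤ a :=
    PySem.List.min?_isMin hm a (by rw [← PySem.List.mem_sorted s (fun x => x) false a, h]; simp)
  have ham : a ≤ m := PySem.List.key_head_sorted_le s (fun x => x) h m hmem
  rw [hm, le_antisymm hma ham]

-- sorting after appending the mixed value is ordered insertion into the sorted remainder
lemma sorted_append_singleton (rest : List Int) (x : Int) (hs : rest.Pairwise (· ≤ ·)) :
    PySem.List.sorted (rest ++ [x]) (fun y => y) false = List.orderedInsert (· ≤ ·) x rest := by
  apply PySem.List.sorted_id_eq_of_perm_of_pairwise
  · exact (List.perm_orderedInsert _ x rest).trans (List.perm_append_singleton x rest).symm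
  · exact List.Pairwise.orderedInsert x rest hs

lemma mixOk_cons₂ (a b : Int) (rest : List Int) (K : Int) :
    mixOk (a :: b :: rest) K
      = if K ≤ a then true else mixOk (List.orderedInsert (· ≤ ·) (a + 2 * b) rest) K := by
  show mixOkN (rest.length + 1 + 1) (a :: b :: rest) K = _
  rw [mixOkN]
  by_cases h : K ≤ a
  · simp [h]
  · simp only [h, if_neg, not_false_iff]
    unfold mixOk
    rw [List.orderedInsert_length]

-- the binary-search insertion step of B equals ordered insertion
lemma b_step (rest' : List Int) (x : Int) (hs : rest'.Pairwise (· ≤ ·)) :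
    PySem.List.insert rest' (bsLoop rest' x 0 (PySem.List.len rest')) x
      = List.orderedInsert (· ≤ ·) x rest' := by
  have hkle : (rest'.takeWhile (fun y => decide (y < x))).length ≤ rest'.length :=
    (List.takeWhile_prefix _).length_le
  rw [PySem.List.len_eq]
  rw [bsLoop_eq rest' x hs (rest'.length) 0 rest'.length (by omega) (by omega) (by omega)
        (by exact_mod_cast Int.natCast_nonneg _) (by exact_mod_cast hkle)]
  exact insert_takeWhile_eq_orderedInsert rest' x

-- when the head of the sorted list is ≥ K, A returns `answer` (the 'return -1' branch is dead)
lemma a_big (s : List Int) (K ans : Int) (a : Int) (t : List Int)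
    (h : PySem.List.sorted s (fun x => x) false = a :: t) (hK : K ≤ a) :
    solutionGo s K ans = ans := by
  rw [solutionGo]
  rw [min?_eq_sorted_head s a t h]
  have hnlt : ¬ a < K := by omega
  simp only [hnlt, if_neg, not_false_iff]
  obtain ⟨M, hM⟩ : ∃ M, PySem.List.max? s (fun x => x) = some M := by
    cases hmax : PySem.List.max? s (fun x => x) with
    | none =>
      have hnil := (PySem.List.max?_eq_none_iff s _).mp hmax
      rw [hnil] at h
      have h2 : ([] : List Int) = a :: t := by rw [← h]; rfl
      simp at h2
    | some M => exact ⟨M, rfl⟩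
  have hmem : M ∈ s := PySem.List.max?_mem hM
  have haM : a ≤ M := PySem.List.key_head_sorted_le s (fun x => x) h M hmem
  rw [hM]
  have : ¬ M < K := by omega
  simp [this]

lemma main_loop (n : Nat) : ∀ (s : List Int) (K ans : Int), s.length ≤ n →
    mixOk (PySem.List.sorted s (fun x => x) false) K = true →
    solutionGo s K ans = altGo (PySem.List.sorted s (fun x => x) false) K ans := by
  induction n with
  | zero =>
    intro s K ans hlen hmix
    have hnil : s = [] := List.length_eq_zero_iff.mp (by omega)
    subst hnil
    have : PySem.List.sorted ([] : List Int) (fun x => x) false = [] := rfl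
    rw [this] at hmix
    exact absurd hmix (by simp [mixOk, mixOkN])
  | succ n ih =>
    intro s K ans hlen hmix
    match hss : PySem.List.sorted s (fun x => x) false with
    | [] =>
      rw [hss] at hmix
      exact absurd hmix (by simp [mixOk, mixOkN])
    | [a] =>
      rw [hss] at hmix
      have hKa : K ≤ a := by
        by_contra hc
        simp [mixOk, mixOkN] at hmix
        omega
      rw [a_big s K ans a [] hss hKa, altGo]
      have : ¬ a < K := by omega
      simp [this]
    | a :: b :: rest =>
      have hpair : (a :: b :: rest).Pairwise (fun x y => x ≤ y) := by
        rw [← hss]; exact PySem.List.sorted_pairwise s (fun x => x)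
      have hrest : rest.Pairwise (· ≤ ·) := (List.pairwise_cons.mp (List.pairwise_cons.mp hpair).2).2
      rw [hss] at hmix
      by_cases hKa : K ≤ a
      · rw [a_big s K ans a (b :: rest) hss hKa, altGo]
        have : ¬ a < K := by omega
        simp [this]
      · have haK : a < K := by omega
        rw [mixOk_cons₂, if_neg hKa] at hmix
        rw [solutionGo, min?_eq_sorted_head s a (b :: rest) hss]
        simp only [haK, if_pos]
        rw [hss]
        rw [altGo]
        simp only [haK, if_pos]
        rw [b_step rest (a + 2 * b) hrest]
        have h2b : a + b * 2 = a + 2 * b := by ring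
        rw [h2b]
        have hlens := congrArg List.length hss
        rw [PySem.List.length_sorted] at hlens
        simp at hlens
        have hsorted' := sorted_append_singleton rest (a + 2 * b) hrest
        calc solutionGo (rest ++ [a + 2 * b]) K (ans + 1)
            = altGo (PySem.List.sorted (rest ++ [a + 2 * b]) (fun x => x) false) K (ans + 1) := by
              apply ih
              · simp; omega
              · rw [hsorted']; exact hmix
          _ = altGo (List.orderedInsert (· ≤ ·) (a + 2 * b) rest) K (ans + 1) := by rw [hsorted']

-- ===== VERDICT (by name: the statement is the Claim_ definition above) =====
theorem solution_spec : Claim_equal_solution := by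
  intro scoville K _ hpre
  unfold Spec_solution solution solution_alt
  exact main_loop scoville.length scoville K 0 le_rfl hpre
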